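-- pv_equiv track=rewrite | github.com/apfoser/PeregrineDHT | utils.py | largest_differing_bit
-- ===== SOURCE A (Python) =====
-- def largest_differing_bit(id1, id2):
--
--     id1 = int(id1, 16)
--     id2 = int(id2, 16)
--
--     distance = id1 ^ id2
--     l = -1
--     while distance:
--         distance >>= 1
--         l += 1
--
--     return max(0, l)
-- ===== SOURCE B (Python) =====
-- def largest_differing_bit(id1, id2):
--     d = int(id1, 16) ^ int(id2, 16)
--     return max(0, d.bit_length() - 1)
-- ===== Notes on version B (the rewrite author's own statement) =====
-- stated objective: faster
-- what changed: Replaces the per-bit shift-and-count while loop with the closed-form int.bit_length(), clamped at 0 to cover the equal-ids case.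
import Mathlib
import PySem

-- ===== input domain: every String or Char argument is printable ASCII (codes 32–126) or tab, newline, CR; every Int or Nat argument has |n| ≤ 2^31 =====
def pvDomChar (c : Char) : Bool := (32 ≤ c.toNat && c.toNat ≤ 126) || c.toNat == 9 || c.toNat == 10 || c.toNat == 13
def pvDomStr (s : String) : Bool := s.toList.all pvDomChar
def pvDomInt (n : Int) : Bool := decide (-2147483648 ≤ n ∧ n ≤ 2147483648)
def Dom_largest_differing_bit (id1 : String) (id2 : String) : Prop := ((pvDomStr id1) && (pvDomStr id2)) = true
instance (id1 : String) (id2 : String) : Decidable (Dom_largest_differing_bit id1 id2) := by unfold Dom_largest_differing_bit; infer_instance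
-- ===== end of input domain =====

-- B replaces A's shift-and-count while loop by the closed-form bit_length()-1 clamped at 0.


-- ===== PORT A =====
-- A's while loop: 'while distance: distance >>= 1; l += 1'.  Under Pre_ the xor is
-- nonnegative (Python diverges otherwise, and Pre_ excludes that), so the loop state is
-- carried as the Nat (xor).toNat, on which it is exact; outside Pre_ nothing is claimed.
def pvLoopA (n : Nat) (l : Int) : Int :=
  if n = 0 then l else pvLoopA (n >>> 1) (l + 1)
termination_by n
decreasing_by simp [Nat.shiftRight_eq_div_pow]; omega

def largest_differing_bit (id1 : String) (id2 : String) : Int :=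
  match PySem.Int.ofStrBase? id1 16, PySem.Int.ofStrBase? id2 16 with
  | some a, some b => max 0 (pvLoopA (PySem.Int.bxor a b).toNat (-1))
  | _, _ => 0  -- int(·,16) raises ValueError: excluded by Pre_

-- ===== PORT B =====
-- d.bit_length() (Python takes the bit length of |d|)
def pvBitLen (n : Nat) : Int := if n = 0 then 0 else (n.log2 : Int) + 1

def largest_differing_bit_alt (id1 : String) (id2 : String) : Int :=
  match (PySem.Int.ofStrBase? id1 16).bind
      (fun a => (PySem.Int.ofStrBase? id2 16).map (fun b => PySem.Int.bxor a b)) with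
  | some d => max 0 (pvBitLen d.natAbs - 1)
  | none => 0  -- int(·,16) raises ValueError: excluded by Pre_

-- ===== PRECONDITION & SPEC =====
-- Pre_ excludes exactly the inputs on which A does not return: strings int(·,16) rejects
-- (ValueError) and pairs whose parsed XOR is negative (exactly one id negative), on which
-- A's 'while distance: distance >>= 1' never terminates (-1 >> 1 == -1).
def Pre_largest_differing_bit (id1 : String) (id2 : String) : Prop :=
  (PySem.Int.ofStrBase? id1 16).isSome = true ∧ (PySem.Int.ofStrBase? id2 16).isSome = true ∧
    0 ≤ PySem.Int.bxor ((PySem.Int.ofStrBase? id1 16).getD 0) ((PySem.Int.ofStrBase? id2 16).getD 0)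
instance (id1 : String) (id2 : String) : Decidable (Pre_largest_differing_bit id1 id2) := by
  unfold Pre_largest_differing_bit; infer_instance

def pvWitness_largest_differing_bit : String × String := ("a", "3")

def Spec_largest_differing_bit (id1 : String) (id2 : String) (out : Int) : Prop := out = largest_differing_bit_alt id1 id2
instance (id1 : String) (id2 : String) (out : Int) : Decidable (Spec_largest_differing_bit id1 id2 out) := by unfold Spec_largest_differing_bit; infer_instance

-- ===== CLAIM (what is proved, stated in full; the proofs are below) =====
def Claim_equal_largest_differing_bit : Prop := ∀ (id1 : String) (id2 : String), Dom_largest_differing_bit id1 id2 → Pre_largest_differing_bit id1 id2 → Spec_largest_differing_bit id1 id2 (largest_differing_bit id1 id2)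

-- ===== LEMMAS AND PROOFS =====
theorem pvLoopA_eq (n : Nat) (l : Int) : pvLoopA n l = l + pvBitLen n := by
  induction n using Nat.strong_induction_on generalizing l with
  | _ n ih =>
    rw [pvLoopA]
    by_cases h0 : n = 0
    · simp [h0, pvBitLen]
    · rw [if_neg h0, ih (n >>> 1) (by simp [Nat.shiftRight_eq_div_pow]; omega)]
      have hs : n >>> 1 = n / 2 := by simp [Nat.shiftRight_eq_div_pow]
      rw [hs]
      by_cases h1 : n / 2 = 0
      · have hn : n = 1 := by omega
        subst hn
        norm_num [pvBitLen, Nat.log2]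
      · have h2 : 2 ≤ n := by omega
        have hl : n.log2 = (n / 2).log2 + 1 := by
          rw [Nat.log2_eq_log_two, Nat.log2_eq_log_two, Nat.log_div_base]
          have := Nat.log_pos (by norm_num : 1 < 2) h2
          omega
        simp only [pvBitLen, if_neg h0, if_neg h1, hl]
        push_cast
        ring

-- ===== VERDICT (by name: the statement is the Claim_ definition above) =====
theorem largest_differing_bit_spec : Claim_equal_largest_differing_bit := by
  intro id1 id2 _ hpre
  obtain ⟨h1, h2, hx⟩ := hpre
  unfold Spec_largest_differing_bit largest_differing_bit largest_differing_bit_alt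
  cases e1 : PySem.Int.ofStrBase? id1 16 with
  | none => simp [e1] at h1
  | some a =>
    cases e2 : PySem.Int.ofStrBase? id2 16 with
    | none => simp [e2] at h2
    | some b =>
      simp only [e1, e2, Option.getD_some, Option.bind_some, Option.map_some] at hx ⊢
      rw [pvLoopA_eq]
      have ht : ((PySem.Int.bxor a b).toNat : Nat) = (PySem.Int.bxor a b).natAbs := by omega
      rw [ht]
      generalize pvBitLen (PySem.Int.bxor a b).natAbs = x
      omega
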